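-- pv_equiv track=rewrite | github.com/TheDinner22/COP3502_project2A | rle_program.py | count_runs
-- ===== SOURCE A (Python) =====
-- def count_runs(flat_data):
--     if len(flat_data) == 0:
--         return []
--
--     # first run is created with the first pixel's value
--     current_run = {"length": 1, "value": flat_data[0]}
--     run_counter = 0
--
--     for pixel in flat_data[1:]:
--         # if this pixel is part of the current run OR this is the first iteration
--         if pixel == current_run["value"]:
--             # is the run full?
--             if current_run["length"] == 15:
--                 # if so, increment run counter
--                 run_counter += 1
--                 # initilize new run with pixel
--                 current_run = {"length": 1, "value": pixel}
--             else:
--                 # if not, then we can just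
--                 # increase the length of the run
--                 current_run["length"] += 1
--         # pixel marks the end of the current run
--         else:
--             # increment run counter
--             run_counter += 1
--             # initilize new run with pixel
--             current_run = {"length": 1, "value": pixel}
--
--     # the last run is not counted so I increment the run_counter here
--     # to compensate
--     run_counter += 1
--
--     return run_counter
-- ===== SOURCE B (Python) =====
-- from itertools import groupby
--
--
-- def count_runs(flat_data):
--     if len(flat_data) == 0:
--         return []
--     total = 0
--     for _, g in groupby(flat_data):
--         length = sum(1 for _ in g)
--         total += (length + 14) // 15
--     return total
-- ===== Notes on version B (the rewrite author's own statement) =====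
-- stated objective: simpler
-- what changed: B replaces A's per-pixel length-tracking with reset-at-15 bookkeeping by grouping the data into maximal runs (itertools.groupby) and adding the closed-form chunk count (L+14)//15 per run.
-- outside the precondition, e.g. on count_runs([]): A returns [], B returns []
import Mathlib
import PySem

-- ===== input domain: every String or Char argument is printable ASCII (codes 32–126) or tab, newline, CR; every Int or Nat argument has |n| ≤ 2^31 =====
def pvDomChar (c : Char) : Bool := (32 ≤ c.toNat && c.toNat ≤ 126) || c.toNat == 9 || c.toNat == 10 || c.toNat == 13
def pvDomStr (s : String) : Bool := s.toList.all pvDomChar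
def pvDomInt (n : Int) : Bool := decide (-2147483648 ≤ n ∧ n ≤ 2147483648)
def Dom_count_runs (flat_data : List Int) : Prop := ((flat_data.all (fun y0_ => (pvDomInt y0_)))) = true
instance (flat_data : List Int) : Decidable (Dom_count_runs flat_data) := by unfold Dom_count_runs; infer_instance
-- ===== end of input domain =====

-- B groups the data into maximal runs and adds the closed-form chunk count (L+14)//15 per run,
-- replacing A's per-pixel length-tracking with reset-at-15 bookkeeping (objective: simpler).

-- ===== PORT A =====
-- state: (value of current run, length of current run, run_counter)
def countRunsStep (st : Int × Int × Int) (pixel : Int) : Int × Int × Int :=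
  if pixel = st.1 then
    if st.2.1 = 15 then (pixel, 1, st.2.2 + 1)
    else (st.1, st.2.1 + 1, st.2.2)
  else (pixel, 1, st.2.2 + 1)

-- Python A returns [] (not an int) on the empty list; that input is outside Pre_, the port returns 0 there.
def count_runs (flat_data : List Int) : Int :=
  match flat_data with
  | [] => 0
  | x :: rest => ((rest.foldl countRunsStep (x, 1, 0)).2.2) + 1

-- ===== PORT B =====
-- itertools.groupby: split off the maximal leading run of v, returning (its extra length, the rest)
def splitRun (v : Int) : List Int → Int × List Int
  | [] => (0, [])
  | x :: xs =>
    if x = v then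
      let p := splitRun v xs
      (p.1 + 1, p.2)
    else (0, x :: xs)

theorem splitRun_len_le (v : Int) : ∀ xs : List Int, (splitRun v xs).2.length ≤ xs.length := by
  intro xs
  induction xs with
  | nil => simp [splitRun]
  | cons x xs ih =>
    simp only [splitRun]
    split
    · exact Nat.le_succ_of_le ih
    · simp

-- the list of lengths of the maximal runs (what groupby yields, with each group's length)
def runLens (l : List Int) : List Int :=
  match l with
  | [] => []
  | x :: xs => ((splitRun x xs).1 + 1) :: runLens (splitRun x xs).2
  termination_by l.length
  decreasing_by
    have := splitRun_len_le x xs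
    simp only [List.length_cons]
    omega

def count_runs_alt (flat_data : List Int) : Int :=
  (runLens flat_data).foldl (fun total L => total + PySem.Int.floordiv (L + 14) 15) 0

-- ===== PRECONDITION & SPEC =====
-- Pre_ excludes only the empty list, on which Python A returns [] — a list, not a value of the declared int type.
def Pre_count_runs (flat_data : List Int) : Prop := flat_data ≠ []
instance (flat_data : List Int) : Decidable (Pre_count_runs flat_data) := by unfold Pre_count_runs; infer_instance
def pvWitness_count_runs : List Int := [3, 3, 7]

def Spec_count_runs (flat_data : List Int) (out : Int) : Prop := out = count_runs_alt flat_data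
instance (flat_data : List Int) (out : Int) : Decidable (Spec_count_runs flat_data out) := by unfold Spec_count_runs; infer_instance

-- ===== CLAIM (what is proved, stated in full; the proofs are below) =====
def Claim_equal_count_runs : Prop := ∀ (flat_data : List Int), Dom_count_runs flat_data → Pre_count_runs flat_data → Spec_count_runs flat_data (count_runs flat_data)

-- ===== LEMMAS AND PROOFS =====

theorem floordiv15 (m : Int) (h1 : 1 ≤ m) (h2 : m ≤ 15) :
    PySem.Int.floordiv (m + 14) 15 = 1 := by
  rw [PySem.Int.floordiv_eq_ediv_of_pos (by omega)]
  omega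

theorem floordiv15_add (c : Int) (_hc : 0 ≤ c) :
    PySem.Int.floordiv (c + 15) 15 + 1 = PySem.Int.floordiv (c + 30) 15 := by
  rw [PySem.Int.floordiv_eq_ediv_of_pos (by omega), PySem.Int.floordiv_eq_ediv_of_pos (by omega)]
  omega

theorem splitRun_nonneg (v : Int) : ∀ xs : List Int, 0 ≤ (splitRun v xs).1 := by
  intro xs
  induction xs with
  | nil => simp [splitRun]
  | cons x xs ih =>
    simp only [splitRun]
    split
    · omega
    · simp

theorem splitRun_cons_eq (v : Int) (xs : List Int) :
    splitRun v (v :: xs) = ((splitRun v xs).1 + 1, (splitRun v xs).2) := by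
  simp [splitRun]

theorem splitRun_cons_ne (v p : Int) (xs : List Int) (h : ¬ p = v) :
    splitRun v (p :: xs) = (0, p :: xs) := by
  simp [splitRun, h]

theorem runLens_cons (x : Int) (xs : List Int) :
    runLens (x :: xs) = ((splitRun x xs).1 + 1) :: runLens (splitRun x xs).2 := by
  rw [runLens]

-- shift the accumulator of B's folded sum
theorem bsum_shift (lens : List Int) (a : Int) :
    lens.foldl (fun total L => total + PySem.Int.floordiv (L + 14) 15) a
      = a + lens.foldl (fun total L => total + PySem.Int.floordiv (L + 14) 15) 0 := by
  induction lens generalizing a with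
  | nil => simp
  | cons L lens ih =>
    simp only [List.foldl_cons]
    rw [ih, ih (0 + PySem.Int.floordiv (L + 14) 15)]
    ring

-- main invariant: A's loop from state (v, l, rc), with 1 ≤ l ≤ 15, counts
-- the chunks of the current run (mass l + leading count of v) plus the chunks of the remaining runs
theorem main_inv : ∀ (xs : List Int) (v l rc : Int), 1 ≤ l → l ≤ 15 →
    (xs.foldl countRunsStep (v, l, rc)).2.2 + 1
      = rc + PySem.Int.floordiv (l + (splitRun v xs).1 + 14) 15
          + (runLens (splitRun v xs).2).foldl (fun total L => total + PySem.Int.floordiv (L + 14) 15) 0 := by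
  intro xs
  induction xs with
  | nil =>
    intro v l rc h1 h2
    simp only [splitRun, runLens, List.foldl_nil]
    have e0 : l + 0 + 14 = l + 14 := by ring
    rw [e0, floordiv15 l h1 h2]
    ring
  | cons p rest ih =>
    intro v l rc h1 h2
    by_cases hpv : p = v
    · subst hpv
      by_cases hl : l = 15
      · subst hl
        have step : countRunsStep (p, 15, rc) p = (p, 1, rc + 1) := by
          simp [countRunsStep]
        rw [List.foldl_cons, step, splitRun_cons_eq, ih p 1 (rc + 1) (by omega) (by omega)]
        have hc := splitRun_nonneg p rest
        have h := floordiv15_add (splitRun p rest).1 hc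
        have e1 : (1 : Int) + (splitRun p rest).1 + 14 = (splitRun p rest).1 + 15 := by ring
        have e2 : (15 : Int) + ((splitRun p rest).1 + 1, (splitRun p rest).2).1 + 14
            = (splitRun p rest).1 + 30 := by ring
        rw [e1, e2]
        linarith
      · have step : countRunsStep (p, l, rc) p = (p, l + 1, rc) := by
          simp [countRunsStep, hl]
        rw [List.foldl_cons, step, splitRun_cons_eq, ih p (l + 1) rc (by omega) (by omega)]
        have e : l + 1 + (splitRun p rest).1 + 14
            = l + ((splitRun p rest).1 + 1, (splitRun p rest).2).1 + 14 := by ring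
        rw [e]
    · have step : countRunsStep (v, l, rc) p = (p, 1, rc + 1) := by
        simp [countRunsStep, hpv]
      rw [List.foldl_cons, step, splitRun_cons_ne v p rest hpv,
        ih p 1 (rc + 1) (by omega) (by omega)]
      have e0 : l + (0, p :: rest).1 + 14 = l + 14 := by ring
      rw [e0, floordiv15 l h1 h2, runLens_cons, List.foldl_cons,
        bsum_shift (runLens (splitRun p rest).2) (0 + PySem.Int.floordiv ((splitRun p rest).1 + 1 + 14) 15)]
      have e : (1 : Int) + (splitRun p rest).1 + 14 = (splitRun p rest).1 + 1 + 14 := by ring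
      rw [e]
      ring

-- ===== VERDICT (by name: the statement is the Claim_ definition above) =====
theorem count_runs_spec : Claim_equal_count_runs := by
  intro flat_data _hdom hpre
  unfold Spec_count_runs
  match flat_data with
  | [] => exact absurd rfl hpre
  | x :: rest =>
    show ((rest.foldl countRunsStep (x, 1, 0)).2.2) + 1 = count_runs_alt (x :: rest)
    rw [main_inv rest x 1 0 (by omega) (by omega)]
    unfold count_runs_alt
    rw [runLens_cons, List.foldl_cons,
      bsum_shift (runLens (splitRun x rest).2) (0 + PySem.Int.floordiv ((splitRun x rest).1 + 1 + 14) 15)]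
    have e : (1 : Int) + (splitRun x rest).1 + 14 = (splitRun x rest).1 + 1 + 14 := by ring
    rw [e]
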